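-- pv_equiv track=rewrite | github.com/codeartemis37/cracker-hash-sha-256-optimised | optimised.py | generate_passwords
-- ===== SOURCE A (Python) =====
-- import string
-- import itertools
--
-- def generate_passwords(max_length, start_from=""):
--     chars = string.ascii_lowercase + string.digits
--     start_length = len(start_from) if start_from else 1
--     for length in range(start_length, max_length + 1):
--         for password in itertools.product(chars, repeat=length):
--             current = ''.join(password)
--             if current > start_from:
--                 yield current
-- ===== SOURCE B (Python) =====
-- import string
--
-- def generate_passwords(max_length, start_from=""):
--     chars = string.ascii_lowercase + string.digits
--
--     def words(remaining, prefix):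
--         if remaining == 0:
--             return [prefix]
--         return [w for c in chars for w in words(remaining - 1, prefix + c)]
--
--     start_length = len(start_from) if start_from else 1
--     for length in range(start_length, max_length + 1):
--         yield from (w for w in words(length, "") if w > start_from)
-- ===== Notes on version B (the rewrite author's own statement) =====
-- stated objective: alternative
-- what changed: Replaces itertools.product's iterative odometer with a recursive DFS over the prefix tree (a helper builds all words of a given length by extending a prefix one character at a time), and the candidates of each length are produced as one filtered batch instead of an element-by-element append loop.
import Mathlib
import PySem

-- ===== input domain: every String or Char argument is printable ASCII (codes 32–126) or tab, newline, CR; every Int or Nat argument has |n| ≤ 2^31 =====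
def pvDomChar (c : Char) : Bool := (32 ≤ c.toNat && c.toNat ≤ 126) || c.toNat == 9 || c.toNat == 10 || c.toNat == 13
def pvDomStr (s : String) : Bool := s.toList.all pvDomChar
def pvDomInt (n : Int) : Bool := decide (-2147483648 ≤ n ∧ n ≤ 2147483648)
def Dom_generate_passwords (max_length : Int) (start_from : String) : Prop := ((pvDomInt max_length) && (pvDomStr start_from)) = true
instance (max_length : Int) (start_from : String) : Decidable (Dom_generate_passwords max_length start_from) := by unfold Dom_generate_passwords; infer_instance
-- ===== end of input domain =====

-- B replaces itertools.product's odometer with a recursive DFS over the prefix tree and batches each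
-- length's candidates through a single filter (same order, same cost): objective 'alternative'.
-- Both Pythons are generators; the ports return the list of yielded values.

-- ===== PORT A =====
-- chars = string.ascii_lowercase + string.digits (shared literal of both Pythons)
def pvChars : List Char := "abcdefghijklmnopqrstuvwxyz0123456789".toList

-- itertools.product(chars, repeat=n): fold over the n copies of the pool, extending every tuple at the end (CPython's documented semantics)
def pvProdRep (n : Nat) : List (List Char) :=
  (List.replicate n pvChars).foldl (fun acc pool => acc.flatMap (fun t => pool.map (fun c => t ++ [c]))) [[]]

def generate_passwords (max_length : Int) (start_from : String) : List String :=
  let start_length : Int := if start_from = "" then 1 else (start_from.toList.length : Int)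
  (PySem.List.pyRange start_length (max_length + 1) 1).foldl (fun out length =>
    -- every length drawn from the range is ≥ 1, so `.toNat` is exact for `repeat=length`
    (pvProdRep length.toNat).foldl (fun out password =>
      let current := String.mk password
      if start_from < current then out ++ [current] else out) out) []

-- ===== PORT B =====
-- Source B's recursive helper `words`: all words of the given length obtained by extending `pre`
-- one character at a time (first character chosen in the outermost call)
def pvWords (remaining : Nat) (pre : List Char) : List (List Char) :=
  match remaining with
  | 0 => [pre]
  | k + 1 => pvChars.flatMap (fun c => pvWords k (pre ++ [c]))

def generate_passwords_alt (max_length : Int) (start_from : String) : List String :=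
  let start_length : Int := if start_from = "" then 1 else (start_from.toList.length : Int)
  (PySem.List.pyRange start_length (max_length + 1) 1).flatMap (fun length =>
    ((pvWords length.toNat []).map String.mk).filter (fun w => start_from < w))

-- ===== PRECONDITION & SPEC =====
def Spec_generate_passwords (max_length : Int) (start_from : String) (out : List String) : Prop := out = generate_passwords_alt max_length start_from
instance (max_length : Int) (start_from : String) (out : List String) : Decidable (Spec_generate_passwords max_length start_from out) := by unfold Spec_generate_passwords; infer_instance

-- ===== CLAIM (what is proved, stated in full; the proofs are below) =====
def Claim_equal_generate_passwords : Prop := ∀ (max_length : Int) (start_from : String), Dom_generate_passwords max_length start_from → Spec_generate_passwords max_length start_from (generate_passwords max_length start_from)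

-- ===== LEMMAS AND PROOFS =====

-- back decomposition of itertools.product (one unfolding of A's foldl over the pool copies)
theorem pvProdRep_back (k : Nat) :
    pvProdRep (k + 1) = (pvProdRep k).flatMap (fun t => pvChars.map (fun c => t ++ [c])) := by
  unfold pvProdRep
  rw [List.replicate_succ', List.foldl_append]
  rfl

-- B's DFS also satisfies the back decomposition: the last character chosen varies fastest
theorem pvWords_back (k : Nat) (p : List Char) :
    pvWords (k + 1) p = (pvWords k p).flatMap (fun w => pvChars.map (fun c => w ++ [c])) := by
  induction k generalizing p with
  | zero =>
    simp only [pvWords, List.flatMap]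
    have : ∀ (l : List Char), (l.flatMap fun c => [p ++ [c]]) = l.map (fun c => p ++ [c]) := by
      intro l
      induction l with
      | nil => rfl
      | cons x xs ih => simp [ih]
    simpa using this pvChars
  | succ k ih =>
    rw [pvWords]
    have : ∀ c ∈ pvChars, pvWords (k + 1) (p ++ [c])
        = (pvWords k (p ++ [c])).flatMap (fun w => pvChars.map (fun c => w ++ [c])) := by
      intro c _; exact ih (p ++ [c])
    rw [List.flatMap_congr this, ← List.flatMap_assoc]
    rfl

-- hence the DFS from the empty prefix produces exactly itertools.product's sequence
theorem pvWords_eq_prodRep (k : Nat) : pvWords k [] = pvProdRep k := by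
  induction k with
  | zero => rfl
  | succ k ih => rw [pvWords_back, ih, ← pvProdRep_back]

-- ===== VERDICT (by name: the statement is the Claim_ definition above) =====
theorem generate_passwords_spec : Claim_equal_generate_passwords := by
  intro max_length start_from _
  unfold Spec_generate_passwords
  simp only [generate_passwords, generate_passwords_alt]
  have hfun : (fun (out : List String) (length : Int) =>
        (pvProdRep length.toNat).foldl (fun out password =>
          if start_from < String.mk password then out ++ [String.mk password] else out) out)
      = (fun out length =>
        out ++ ((pvWords length.toNat []).map String.mk).filter (fun w => start_from < w)) := by
    funext out length
    rw [pvWords_eq_prodRep,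
      PySem.List.foldl_append_ite (fun pw => start_from < String.mk pw) (fun pw => String.mk pw),
      List.filter_map]
    rfl
  rw [hfun, PySem.List.foldl_append_eq_flatMap]
  rfl
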